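-- pv_equiv track=rewrite | github.com/cloudiosx/Data-Structures-and-Algorithms | Structy/Exhaustive Recursion/substitute_synonyms.py | generate
-- ===== SOURCE A (Python) =====
-- def generate(words, synonyms):
--   if len(words) == 0:
--     return [[]]
--
--   first_word = words[0]
--   remaining_words = words[1:]
--   remaining_possibilities = generate(remaining_words, synonyms)
--
--   if first_word in synonyms:
--     res = []
--     for synonym in synonyms[first_word]:
--       for possibility in remaining_possibilities:
--         res.append([synonym, *possibility])
--     return res
--   else:
--     res = []
--     for possibility in remaining_possibilities:
--         res.append([first_word, *possibility])
--     return res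
-- ===== SOURCE B (Python) =====
-- def generate(words, synonyms):
--   results = [[]]
--   for word in words:
--     choices = synonyms[word] if word in synonyms else [word]
--     results = [partial + [choice] for partial in results for choice in choices]
--   return results
-- ===== Notes on version B (the rewrite author's own statement) =====
-- stated objective: alternative
-- what changed: Replaces the recursion on the word list (building each combination back-to-front by prepending) with an iterative left-to-right fold that extends every partial combination by each choice for the current word.
import Mathlib
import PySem

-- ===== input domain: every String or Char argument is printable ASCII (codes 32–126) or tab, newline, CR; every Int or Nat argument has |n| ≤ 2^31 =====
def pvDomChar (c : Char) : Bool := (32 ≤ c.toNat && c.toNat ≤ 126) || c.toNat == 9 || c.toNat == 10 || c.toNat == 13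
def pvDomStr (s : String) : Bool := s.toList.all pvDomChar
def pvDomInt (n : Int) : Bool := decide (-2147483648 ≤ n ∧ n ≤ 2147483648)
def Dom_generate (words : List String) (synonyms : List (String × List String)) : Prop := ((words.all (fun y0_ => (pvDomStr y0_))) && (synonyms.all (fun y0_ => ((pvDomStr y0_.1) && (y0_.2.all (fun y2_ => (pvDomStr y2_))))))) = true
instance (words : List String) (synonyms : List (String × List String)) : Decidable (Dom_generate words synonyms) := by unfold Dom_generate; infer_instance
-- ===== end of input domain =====

-- B changes the decomposition: the recursion on the tail (prepending the first word's choice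
-- to every tail combination) is replaced by an iterative left-to-right fold that appends each
-- choice for the current word to every partial combination; same output, same cost.

-- ===== PORT A =====
-- 'first_word in synonyms' / 'synonyms[first_word]' (dict membership + lookup) ported as one get?.
def generate (words : List String) (synonyms : List (String × List String)) : List (List String) :=
  match words with
  | [] => [[]]
  | first_word :: remaining_words =>
    let remaining_possibilities := generate remaining_words synonyms
    match (PySem.Dict.mk synonyms).get? first_word with
    | some syns =>
        syns.foldl (fun res synonym =>
          remaining_possibilities.foldl (fun res possibility => res ++ [synonym :: possibility]) res) []
    | none =>
        remaining_possibilities.foldl (fun res possibility => res ++ [first_word :: possibility]) []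

-- ===== PORT B =====
def generate_alt (words : List String) (synonyms : List (String × List String)) : List (List String) :=
  words.foldl (fun results word =>
    let choices := match (PySem.Dict.mk synonyms).get? word with
      | some l => l
      | none => [word]
    results.flatMap (fun part => choices.map (fun choice => part ++ [choice]))) [[]]

-- ===== PRECONDITION & SPEC =====
def Spec_generate (words : List String) (synonyms : List (String × List String)) (out : List (List String)) : Prop := out = generate_alt words synonyms
instance (words : List String) (synonyms : List (String × List String)) (out : List (List String)) : Decidable (Spec_generate words synonyms out) := by unfold Spec_generate; infer_instance

-- ===== CLAIM (what is proved, stated in full; the proofs are below) =====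
def Claim_equal_generate : Prop := ∀ (words : List String) (synonyms : List (String × List String)), Dom_generate words synonyms → Spec_generate words synonyms (generate words synonyms)

-- ===== LEMMAS AND PROOFS =====

-- the word's choice list, as both programs compute it
def pvChoices (synonyms : List (String × List String)) (w : String) : List String :=
  match (PySem.Dict.mk synonyms).get? w with
  | some l => l
  | none => [w]

-- A's recursion in flatMap form
theorem generate_cons (w : String) (ws : List String) (syn : List (String × List String)) :
    generate (w :: ws) syn
      = (pvChoices syn w).flatMap (fun c => (generate ws syn).map (fun q => c :: q)) := by
  simp only [generate, pvChoices]
  cases h : (PySem.Dict.mk syn).get? w with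
  | none =>
      simp only [PySem.List.foldl_append_singleton_eq_map, List.nil_append]
      simp
  | some syns =>
      simp only [PySem.List.foldl_append_singleton_eq_map]
      rw [PySem.List.foldl_append_eq_flatMap (fun s => (generate ws syn).map (fun p => s :: p)) syns []]
      simp

-- B's fold, characterised: it extends every partial by every combination for the remaining words
theorem foldl_build (syn : List (String × List String)) (ws : List String) :
    ∀ acc : List (List String),
      ws.foldl (fun results word =>
        (results.flatMap (fun part => (pvChoices syn word).map (fun choice => part ++ [choice])))) acc
      = acc.flatMap (fun p => (generate ws syn).map (fun q => p ++ q)) := by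
  induction ws with
  | nil => intro acc; simp [generate]
  | cons w ws ih =>
      intro acc
      simp only [List.foldl_cons, ih, generate_cons]
      simp [List.flatMap_assoc, List.map_flatMap, List.flatMap_map, List.map_map,
        List.append_assoc, Function.comp_def]

-- ===== VERDICT (by name: the statement is the Claim_ definition above) =====
theorem generate_spec : Claim_equal_generate := by
  intro words syn _
  show generate words syn = generate_alt words syn
  have h := foldl_build syn words [[]]
  simp only [generate_alt, pvChoices] at h ⊢
  rw [h]
  simp
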